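-- pv_equiv track=rewrite | github.com/lesnerd/Python | partition_string_labels.py | partition_string_labels
-- ===== SOURCE A (Python) =====
-- def partition_string_labels(s):
--     last_index = {c : i for i, c in enumerate(s)} # O(n) each char to its last index
--     result = []
--     size = end = 0
--     for i, c in enumerate(s): # O(n)
--         end = max(end, last_index[c]) # O(1)
--         size += 1
--
--         if i == end:
--             result.append(size)
--             size = 0
--     return result
-- ===== SOURCE B (Python) =====
-- def partition_string_labels(s):
--     result = []
--     prev = -1
--     for i in range(len(s)):
--         if set(s[:i+1]).isdisjoint(s[i+1:]):
--             result.append(i - prev)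
--             prev = i
--     return result
-- ===== Notes on version B (the rewrite author's own statement) =====
-- stated objective: alternative
-- what changed: B drops the last-index dict and the running max/size state entirely: a position i ends a partition iff the prefix s[:i+1] is disjoint from the suffix s[i+1:], and partition lengths are differences of consecutive cut positions.
import Mathlib
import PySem

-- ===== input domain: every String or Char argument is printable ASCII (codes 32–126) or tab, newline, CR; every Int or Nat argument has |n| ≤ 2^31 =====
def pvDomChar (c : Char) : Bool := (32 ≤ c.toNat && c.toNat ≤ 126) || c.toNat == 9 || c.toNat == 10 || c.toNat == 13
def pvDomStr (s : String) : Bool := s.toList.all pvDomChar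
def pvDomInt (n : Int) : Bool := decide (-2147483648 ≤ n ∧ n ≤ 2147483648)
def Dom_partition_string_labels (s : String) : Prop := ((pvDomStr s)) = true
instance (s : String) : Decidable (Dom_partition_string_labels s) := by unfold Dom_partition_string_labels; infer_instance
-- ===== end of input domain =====

-- B replaces A's last-index dict and running max/size counters by a direct test: position i ends a
-- partition iff the prefix s[:i+1] is disjoint from the suffix s[i+1:]; lengths are differences of cuts.
-- (objective: alternative; B is not faster)

-- ===== PORT A =====
def partition_string_labels (s : String) : List Int :=
  let cs := s.toList
  let last_index : PySem.Dict Char Int :=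
    (PySem.List.enumerate cs).foldl (fun d ic => d.insert ic.2 ic.1) PySem.Dict.empty
  let st := (PySem.List.enumerate cs).foldl
    (fun (st : List Int × Int × Int) ic =>
      -- last_index[c]: the key is always present (c comes from s), so Python never raises here
      let e := max st.2.2 (last_index.getD ic.2 0)
      let size := st.2.1 + 1
      if ic.1 == e then (st.1 ++ [size], 0, e) else (st.1, size, e))
    ([], 0, 0)
  st.1

-- ===== PORT B =====
def partition_string_labels_alt (s : String) : List Int :=
  let cs := s.toList
  let st := (PySem.List.pyRange 0 (PySem.List.len cs)).foldl
    (fun (st : List Int × Int) i =>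
      if PySem.Set.isdisjoint (PySem.Set.ofList (PySem.List.slice cs none (some (i + 1))))
           (PySem.List.slice cs (some (i + 1)) none)
      then (st.1 ++ [i - st.2], i) else st)
    ([], -1)
  st.1

-- ===== PRECONDITION & SPEC =====
def Spec_partition_string_labels (s : String) (out : List Int) : Prop := out = partition_string_labels_alt s
instance (s : String) (out : List Int) : Decidable (Spec_partition_string_labels s out) := by unfold Spec_partition_string_labels; infer_instance

-- ===== CLAIM (what is proved, stated in full; the proofs are below) =====
def Claim_equal_partition_string_labels : Prop := ∀ (s : String), Dom_partition_string_labels s → Spec_partition_string_labels s (partition_string_labels s)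

-- ===== LEMMAS AND PROOFS =====

-- last index of c in cs as A's dict-comprehension computes it (0 if absent, never looked up then)
def lastL (cs : List Char) (c : Char) : Int :=
  (PySem.List.enumerate cs).foldl (fun a p => if p.2 == c then p.1 else a) 0

-- A's running `end` after the first i positions
def Emax (cs : List Char) (i : Nat) : Int :=
  ((cs.take i).map (lastL cs)).foldl max 0

theorem dict_fold_getD (ps : List (Int × Char)) (d : PySem.Dict Char Int) (c : Char) :
    ((ps.foldl (fun d ic => d.insert ic.2 ic.1) d).getD c 0)
      = ps.foldl (fun a p => if p.2 == c then p.1 else a) (d.getD c 0) := by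
  induction ps generalizing d with
  | nil => rfl
  | cons p ps ih =>
      simp only [List.foldl_cons, ih, PySem.Dict.getD_insert]
      by_cases h : p.2 = c
      · simp [h]
      · simp [h, Ne.symm h]

theorem lastL_dict (cs : List Char) (c : Char) :
    ((PySem.List.enumerate cs).foldl (fun d ic => d.insert ic.2 ic.1) PySem.Dict.empty).getD c 0
      = lastL cs c := by
  rw [dict_fold_getD]; rfl

theorem lastL_append (cs : List Char) (x c : Char) :
    lastL (cs ++ [x]) c = if x == c then (cs.length : Int) else lastL cs c := by
  unfold lastL
  rw [PySem.List.enumerate_append]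
  simp [PySem.List.enumerate]

theorem lastL_spec (cs : List Char) (c : Char) (hc : c ∈ cs) :
    ∃ m : Nat, lastL cs c = (m : Int) ∧ m < cs.length ∧ cs[m]? = some c ∧ c ∉ cs.drop (m + 1) := by
  induction cs using List.reverseRecOn with
  | nil => simp at hc
  | append_singleton ys x ih =>
      rw [lastL_append]
      by_cases hx : x = c
      · refine ⟨ys.length, by simp [hx], by simp, ?_, ?_⟩
        · subst hx; simp
        · intro hmem
          rw [show ys.length + 1 = (ys ++ [x]).length by simp] at hmem
          simp at hmem
      · have hc' : c ∈ ys := by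
          rcases List.mem_append.1 hc with h | h
          · exact h
          · simp at h; exact absurd h.symm hx
        obtain ⟨m, h1, h2, h3, h4⟩ := ih hc'
        have hbeq : (x == c) = false := by simp [hx]
        refine ⟨m, by simp [hbeq, h1], by simp; omega, ?_, ?_⟩
        · rw [List.getElem?_append_left h2]; exact h3
        · rw [List.drop_append_of_le_length (by omega)]
          intro hmem
          rcases List.mem_append.1 hmem with h | h
          · exact h4 h
          · simp at h; exact hx h.symm

-- for c occurring in cs: c is absent from the suffix after i iff its last index is ≤ i
theorem lastL_le_iff (cs : List Char) (c : Char) (hc : c ∈ cs) (i : Nat) :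
    c ∉ cs.drop (i + 1) ↔ lastL cs c ≤ (i : Int) := by
  obtain ⟨m, h1, h2, h3, h4⟩ := lastL_spec cs c hc
  rw [h1]
  constructor
  · intro hnm
    by_contra hgt
    push Not at hgt
    have him : i + 1 ≤ m := by exact_mod_cast hgt
    apply hnm
    have : (cs.drop (i + 1))[m - (i + 1)]? = some c := by
      rw [List.getElem?_drop]
      rw [show i + 1 + (m - (i + 1)) = m by omega]
      exact h3
    exact List.mem_of_getElem? this
  · intro hle hmem
    have hmi : m ≤ i := by exact_mod_cast hle
    apply h4
    have : cs.drop (i + 1) = (cs.drop (m + 1)).drop (i - m) := by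
      rw [List.drop_drop]
      congr 1
      omega
    rw [this] at hmem
    exact List.mem_of_mem_drop hmem

theorem lastL_ge (cs : List Char) (i : Nat) (h : i < cs.length) :
    (i : Int) ≤ lastL cs cs[i] := by
  obtain ⟨m, h1, h2, h3, h4⟩ := lastL_spec cs cs[i] (List.getElem_mem h)
  rw [h1]
  by_contra hgt
  push Not at hgt
  have hmi : m + 1 ≤ i := by exact_mod_cast hgt
  apply h4
  have : (cs.drop (m + 1))[i - (m + 1)]? = some cs[i] := by
    rw [List.getElem?_drop, show m + 1 + (i - (m + 1)) = i by omega]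
    exact List.getElem?_eq_getElem h
  exact List.mem_of_getElem? this

theorem foldl_max_le (l : List Int) (a b : Int) (ha : a ≤ b) (h : ∀ x ∈ l, x ≤ b) :
    l.foldl max a ≤ b := by
  induction l generalizing a with
  | nil => exact ha
  | cons x l ih => exact ih _ (max_le ha (h x (by simp))) (fun y hy => h y (by simp [hy]))

theorem le_foldl_max (l : List Int) (a x : Int) (h : x ∈ l ∨ x ≤ a) :
    x ≤ l.foldl max a := by
  induction l generalizing a with
  | nil => simpa using h
  | cons y l ih =>
      rcases h with h | h
      · rcases List.mem_cons.1 h with rfl | h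
        · exact ih _ (Or.inr (le_max_right _ _))
        · exact ih _ (Or.inl h)
      · exact ih _ (Or.inr (le_trans h (le_max_left _ _)))

theorem Emax_succ (cs : List Char) (i : Nat) (h : i < cs.length) :
    Emax cs (i + 1) = max (Emax cs i) (lastL cs cs[i]) := by
  have h' : i < (List.map (lastL cs) cs).length := by simpa using h
  have ht : List.take (i + 1) (List.map (lastL cs) cs)
      = List.take i (List.map (lastL cs) cs) ++ [lastL cs cs[i]] := by
    rw [List.take_add_one, List.getElem?_eq_getElem h']
    simp
  unfold Emax
  simp only [List.map_take] at *
  rw [ht, List.foldl_append]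
  simp

theorem cut_iff (cs : List Char) (i : Nat) (h : i < cs.length) :
    (Emax cs (i + 1) = (i : Int)) ↔ ∀ x ∈ cs.take (i + 1), x ∉ cs.drop (i + 1) := by
  constructor
  · intro he x hx
    have hxc : x ∈ cs := List.mem_of_mem_take hx
    have hm : lastL cs x ∈ (cs.take (i + 1)).map (lastL cs) := List.mem_map_of_mem hx
    have : lastL cs x ≤ (i : Int) := by
      have := le_foldl_max ((cs.take (i + 1)).map (lastL cs)) 0 (lastL cs x) (Or.inl hm)
      unfold Emax at he
      omega
    exact (lastL_le_iff cs x hxc i).2 this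
  · intro hall
    have hub : Emax cs (i + 1) ≤ (i : Int) := by
      unfold Emax
      refine foldl_max_le _ 0 i (by positivity) ?_
      intro y hy
      obtain ⟨x, hx, rfl⟩ := List.mem_map.1 hy
      exact (lastL_le_iff cs x (List.mem_of_mem_take hx) i).1 (hall x hx)
    have hlb : (i : Int) ≤ Emax cs (i + 1) := by
      rw [Emax_succ cs i h]
      exact le_trans (lastL_ge cs i h) (le_max_right _ _)
    omega

-- main loop correspondence
theorem main_loop (cs : List Char) (k : Nat) (res : List Int) (size prev e : Int)
    (hk : k ≤ cs.length) (hsize : size = (k : Int) - 1 - prev) (he : e = Emax cs k) :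
    ((PySem.List.pyRange k cs.length).foldl
      (fun (st : List Int × Int × Int) (j : Int) =>
        let e := max st.2.2 (lastL cs (PySem.List.pyGetD cs j 'a'))
        let size := st.2.1 + 1
        if j == e then (st.1 ++ [size], 0, e) else (st.1, size, e))
      (res, size, e)).1
    = ((PySem.List.pyRange k cs.length).foldl
        (fun (st : List Int × Int) i =>
          if PySem.Set.isdisjoint (PySem.Set.ofList (PySem.List.slice cs none (some (i + 1))))
               (PySem.List.slice cs (some (i + 1)) none)
          then (st.1 ++ [i - st.2], i) else st)
        (res, prev)).1 := by
  induction hfuel : cs.length - k generalizing k res size prev e with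
  | zero =>
      have hke : cs.length ≤ k := by omega
      rw [PySem.List.pyRange_one_eq_nil (by exact_mod_cast hke)]
      rfl
  | succ n ih =>
      have hlt : k < cs.length := by omega
      rw [PySem.List.pyRange_one_cons (by exact_mod_cast hlt)]
      simp only [List.foldl_cons]
      have hget : PySem.List.pyGetD cs (k : Int) 'a' = cs[k] := by
        rw [PySem.List.pyGetD_natCast]
        exact List.getD_eq_getElem cs 'a' hlt
      have hE : max e (lastL cs cs[k]) = Emax cs (k + 1) := by
        rw [he, Emax_succ cs k hlt]
      have hsliceL : PySem.List.slice cs none (some ((k : Int) + 1)) = cs.take (k + 1) := by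
        rw [show ((k : Int) + 1) = ((k + 1 : Nat) : Int) by push_cast; ring]
        exact PySem.List.slice_to_natCast cs (k + 1)
      have hsliceR : PySem.List.slice cs (some ((k : Int) + 1)) none = cs.drop (k + 1) := by
        rw [show ((k : Int) + 1) = ((k + 1 : Nat) : Int) by push_cast; ring]
        exact PySem.List.slice_from_natCast cs (k + 1)
      have hcast : ((k : Int) + 1) = ((k + 1 : Nat) : Int) := by push_cast; ring
      by_cases hcut : Emax cs (k + 1) = (k : Int)
      · have hA : ((k : Int) == Emax cs (k + 1)) = true := by simp [hcut]
        have hB : PySem.Set.isdisjoint (PySem.Set.ofList (PySem.List.slice cs none (some ((k : Int) + 1))))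
            (PySem.List.slice cs (some ((k : Int) + 1)) none) = true := by
          rw [hsliceL, hsliceR, PySem.Set.isdisjoint_iff]
          intro x hx
          exact (cut_iff cs k hlt).1 hcut x ((PySem.Set.mem_ofList _ x).1 hx)
        simp only [hget, hE, hA, hB, if_true]
        rw [show size + 1 = (k : Int) - prev by omega]
        rw [show ((k : Int) + 1) = ((k + 1 : Nat) : Int) from hcast]
        exact ih (k + 1) (res ++ [(k : Int) - prev]) 0 (k : Int) (Emax cs (k + 1))
          (by omega) (by push_cast; omega) rfl (by omega)
      · have hA : ((k : Int) == Emax cs (k + 1)) = false := by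
          simp only [beq_eq_false_iff_ne, ne_eq]
          intro hcontra
          exact hcut hcontra.symm
        have hB : PySem.Set.isdisjoint (PySem.Set.ofList (PySem.List.slice cs none (some ((k : Int) + 1))))
            (PySem.List.slice cs (some ((k : Int) + 1)) none) = false := by
          rw [hsliceL, hsliceR]
          rw [Bool.eq_false_iff]
          intro htrue
          apply hcut
          rw [cut_iff cs k hlt]
          intro x hx
          exact (PySem.Set.isdisjoint_iff _ _).1 htrue x ((PySem.Set.mem_ofList _ x).2 hx)
        simp only [hget, hE, hA, hB, Bool.false_eq_true, if_false]
        rw [show ((k : Int) + 1) = ((k + 1 : Nat) : Int) from hcast]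
        exact ih (k + 1) res (size + 1) prev (Emax cs (k + 1))
          (by omega) (by push_cast; omega) rfl (by omega)

-- ===== VERDICT (by name: the statement is the Claim_ definition above) =====
theorem partition_string_labels_spec : Claim_equal_partition_string_labels := by
  intro s _
  unfold Spec_partition_string_labels partition_string_labels partition_string_labels_alt
  simp only [lastL_dict]
  rw [PySem.List.enumerate_eq_map_pyRange s.toList 'a', List.foldl_map]
  exact main_loop s.toList 0 [] 0 (-1) 0 (Nat.zero_le _) (by norm_num) rfl
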